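-- pv_equiv track=rewrite | github.com/doinaoki/mahjong | mahjong/generate_mahjong/yakuCheck.py | arrangement
-- ===== SOURCE A (Python) =====
-- def arrangement(yakus):
--     new_yakus = []
--     for i in range(9):
--         maxhan = 0
--         y = []
--         for yaku in yakus:
--             agari_piece = yaku[0]
--             han = yaku[1]
--             if agari_piece != i:
--                 continue
--             if maxhan < han:
--                 y = yaku
--                 maxhan = han
--         if maxhan != 0:
--             new_yakus.append(y)
--     return new_yakus
-- ===== SOURCE B (Python) =====
-- def arrangement(yakus):
--     best = {}
--     for yaku in yakus:
--         agari_piece = yaku[0]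
--         han = yaku[1]
--         if 0 <= agari_piece < 9 and han > 0:
--             if agari_piece not in best or best[agari_piece][1] < han:
--                 best[agari_piece] = yaku
--     return [best[i] for i in range(9) if i in best]
-- ===== Notes on version B (the rewrite author's own statement) =====
-- stated objective: alternative
-- what changed: Replaces A's nine full scans of yakus (one scan per index 0..8) by a single pass that keeps the best yaku per index in a dict, then emits indices 0..8 in order.
import Mathlib
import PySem

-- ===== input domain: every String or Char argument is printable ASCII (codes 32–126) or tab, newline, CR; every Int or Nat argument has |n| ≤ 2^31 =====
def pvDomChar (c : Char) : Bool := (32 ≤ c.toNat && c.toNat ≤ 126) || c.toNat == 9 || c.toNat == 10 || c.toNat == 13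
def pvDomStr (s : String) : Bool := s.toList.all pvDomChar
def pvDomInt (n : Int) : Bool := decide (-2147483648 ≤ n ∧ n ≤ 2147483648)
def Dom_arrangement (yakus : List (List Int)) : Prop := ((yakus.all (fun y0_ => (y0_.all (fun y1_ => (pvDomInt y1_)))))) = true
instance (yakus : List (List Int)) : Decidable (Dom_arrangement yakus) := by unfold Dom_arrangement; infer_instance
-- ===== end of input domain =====

-- B replaces A's nine full scans by one pass keeping the best yaku per index in a dict; return values agree (no mutation involved).

-- ===== PORT A =====
-- inner loop body: for yaku in yakus, tracking (maxhan, y)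
def pvAStep (i : Int) (st : Int × List Int) (yaku : List Int) : Int × List Int :=
  let agari_piece := (PySem.List.pyGet? yaku (0 : Int)).getD 0
  let han := (PySem.List.pyGet? yaku (1 : Int)).getD 0
  if agari_piece ≠ i then st
  else if st.1 < han then (han, yaku) else st

def arrangement (yakus : List (List Int)) : List (List Int) :=
  (PySem.List.pyRange 0 9 1).foldl (fun new_yakus i =>
    let st := yakus.foldl (pvAStep i) (0, [])
    if st.1 ≠ 0 then new_yakus ++ [st.2] else new_yakus) []

-- ===== PORT B =====
def pvBStep (best : PySem.Dict Int (List Int)) (yaku : List Int) : PySem.Dict Int (List Int) :=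
  let agari_piece := (PySem.List.pyGet? yaku (0 : Int)).getD 0
  let han := (PySem.List.pyGet? yaku (1 : Int)).getD 0
  if 0 ≤ agari_piece ∧ agari_piece < 9 ∧ 0 < han then
    match best.get? agari_piece with
    | none => best.insert agari_piece yaku
    | some cur =>
        if (PySem.List.pyGet? cur (1 : Int)).getD 0 < han then best.insert agari_piece yaku else best
  else best

def arrangement_alt (yakus : List (List Int)) : List (List Int) :=
  let best := yakus.foldl pvBStep PySem.Dict.empty
  (PySem.List.pyRange 0 9 1).foldl (fun acc i =>
    match best.get? i with
    | some y => acc ++ [y]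
    | none => acc) []

-- ===== PRECONDITION & SPEC =====
-- A indexes yaku[0] and yaku[1] of every element, so a yaku of length < 2 raises IndexError in both Pythons.
def Pre_arrangement (yakus : List (List Int)) : Prop := ∀ y ∈ yakus, 2 ≤ y.length
instance (yakus : List (List Int)) : Decidable (Pre_arrangement yakus) := by unfold Pre_arrangement; infer_instance
def pvWitness_arrangement : List (List Int) := [[0, 2], [0, 3], [4, 1], [10, 5], [3, 0]]

def Spec_arrangement (yakus : List (List Int)) (out : List (List Int)) : Prop := out = arrangement_alt yakus
instance (yakus : List (List Int)) (out : List (List Int)) : Decidable (Spec_arrangement yakus out) := by unfold Spec_arrangement; infer_instance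

-- ===== CLAIM (what is proved, stated in full; the proofs are below) =====
def Claim_equal_arrangement : Prop := ∀ (yakus : List (List Int)), Dom_arrangement yakus → Pre_arrangement yakus → Spec_arrangement yakus (arrangement yakus)

-- ===== LEMMAS AND PROOFS =====

-- A's inner state as an option: the entry A would emit for index i (none when maxhan = 0)
def pvToOpt (st : Int × List Int) : Option (List Int) :=
  if st.1 = 0 then none else some st.2

-- invariant on A's inner state: maxhan is 0, or positive and equal to the stored yaku's han
def pvGood (st : Int × List Int) : Prop :=
  st.1 = 0 ∨ (0 < st.1 ∧ (PySem.List.pyGet? st.2 (1 : Int)).getD 0 = st.1)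

theorem pvMain (ys : List (List Int)) (best : PySem.Dict Int (List Int))
    (f : Int → Int × List Int)
    (h : ∀ i : Int, 0 ≤ i → i < 9 → pvGood (f i) ∧ best.get? i = pvToOpt (f i)) :
    ∀ i : Int, 0 ≤ i → i < 9 →
      pvGood (ys.foldl (pvAStep i) (f i)) ∧
      (ys.foldl pvBStep best).get? i = pvToOpt (ys.foldl (pvAStep i) (f i)) := by
  induction ys generalizing best f with
  | nil => simpa using h
  | cons yaku ys ih =>
    intro i h0 h9
    simp only [List.foldl_cons]
    have hstep : ∀ j : Int, 0 ≤ j → j < 9 →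
        pvGood (pvAStep j (f j) yaku) ∧ (pvBStep best yaku).get? j = pvToOpt (pvAStep j (f j) yaku) := by
      intro j hj0 hj9
      obtain ⟨hg, he⟩ := h j hj0 hj9
      set a := (PySem.List.pyGet? yaku (0 : Int)).getD 0 with ha
      set hn := (PySem.List.pyGet? yaku (1 : Int)).getD 0 with hh
      by_cases hji : a = j
      · subst hji
        have hA : pvAStep a (f a) yaku = if (f a).1 < hn then (hn, yaku) else f a := by
          simp [pvAStep, ← ha, ← hh]
        by_cases hpos : 0 < hn
        · have hB : pvBStep best yaku =
              (match best.get? a with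
               | none => best.insert a yaku
               | some cur =>
                   if (PySem.List.pyGet? cur (1 : Int)).getD 0 < hn then best.insert a yaku else best) := by
            simp only [pvBStep, ← ha, ← hh]
            rw [if_pos ⟨hj0, hj9, hpos⟩]
          have hgood : pvGood (hn, yaku) := Or.inr ⟨hpos, hh.symm⟩
          rcases hg with hz | ⟨hp, hhan⟩
          · have hlt : (f a).1 < hn := by omega
            have hopt : best.get? a = none := by rw [he]; simp [pvToOpt, hz]
            refine ⟨by rw [hA, if_pos hlt]; exact hgood, ?_⟩
            rw [hB, hopt, hA, if_pos hlt]
            simp [PySem.Dict.get?_insert_self, pvToOpt, hpos.ne']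
          · have hopt : best.get? a = some (f a).2 := by rw [he]; simp [pvToOpt, hp.ne']
            rw [hB, hopt]
            by_cases hlt : (f a).1 < hn
            · refine ⟨by rw [hA, if_pos hlt]; exact hgood, ?_⟩
              simp only [hhan]
              rw [if_pos hlt, hA, if_pos hlt]
              simp [PySem.Dict.get?_insert_self, pvToOpt, hpos.ne']
            · refine ⟨by rw [hA, if_neg hlt]; exact Or.inr ⟨hp, hhan⟩, ?_⟩
              simp only [hhan]
              rw [if_neg hlt, hA, if_neg hlt, he]
        · -- han ≤ 0: neither side changes anything for this yaku
          have hAe : pvAStep a (f a) yaku = f a := by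
            rw [hA, if_neg (by rcases hg with hz | ⟨hp, _⟩ <;> omega)]
          have hBe : pvBStep best yaku = best := by
            simp only [pvBStep, ← ha, ← hh]
            rw [if_neg (by intro hc; exact hpos hc.2.2)]
          rw [hAe, hBe]; exact ⟨hg, he⟩
      · -- other index: both sides unchanged at j
        have hAe : pvAStep j (f j) yaku = f j := by
          simp [pvAStep, ← ha, hji]
        have hne : j ≠ a := fun hq => hji hq.symm
        have hBe : (pvBStep best yaku).get? j = best.get? j := by
          simp only [pvBStep, ← ha, ← hh]
          split
          · split
            · exact PySem.Dict.get?_insert_of_ne _ _ hne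
            · split
              · exact PySem.Dict.get?_insert_of_ne _ _ hne
              · rfl
          · rfl
        rw [hAe, hBe]; exact ⟨hg, he⟩
    exact ih (pvBStep best yaku) (fun j => pvAStep j (f j) yaku) hstep i h0 h9

-- ===== VERDICT (by name: the statement is the Claim_ definition above) =====
theorem arrangement_spec : Claim_equal_arrangement := by
  intro yakus _ _
  unfold Spec_arrangement arrangement arrangement_alt
  have key := pvMain yakus PySem.Dict.empty (fun _ => (0, []))
    (by intro i _ _; exact ⟨Or.inl rfl, by simp [pvToOpt]⟩)
  apply PySem.List.foldl_congr_mem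
  intro acc i hi
  obtain ⟨h0, h9⟩ := (PySem.List.mem_pyRange_one).1 hi
  obtain ⟨-, hb⟩ := key i h0 h9
  rw [hb]
  by_cases hz : (yakus.foldl (pvAStep i) (0, [])).1 = 0 <;> simp [pvToOpt, hz]
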